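-- pv_equiv track=rewrite | github.com/songbyungsub/Programmers | Lv.0/외계어 사전.py | solution
-- ===== SOURCE A (Python) =====
-- def solution(spell, dic):
--     answer = 2
--     spell.sort()
--     for i in dic:
--         if len(spell) == len(i):
--             result = sorted(list(i))
--             if spell == result: answer = 1
--
--     return answer
-- ===== SOURCE B (Python) =====
-- def _freq(w):
--     d = {}
--     for ch in w:
--         d[ch] = d.get(ch, 0) + 1
--     return d
--
--
-- def solution(spell, dic):
--     spell.sort()  # kept so the caller still sees spell sorted in place, as with A
--     cs = _freq(spell)
--     return 1 if any(_freq(w) == cs for w in dic) else 2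
-- ===== Notes on version B (the rewrite author's own statement) =====
-- stated objective: idiomatic
-- what changed: A sorts the characters of every dictionary word and compares lists; B builds one character-frequency dict for spell and compares each word's frequency dict against it (any(...)), with no per-word sort or length guard.
import Mathlib
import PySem

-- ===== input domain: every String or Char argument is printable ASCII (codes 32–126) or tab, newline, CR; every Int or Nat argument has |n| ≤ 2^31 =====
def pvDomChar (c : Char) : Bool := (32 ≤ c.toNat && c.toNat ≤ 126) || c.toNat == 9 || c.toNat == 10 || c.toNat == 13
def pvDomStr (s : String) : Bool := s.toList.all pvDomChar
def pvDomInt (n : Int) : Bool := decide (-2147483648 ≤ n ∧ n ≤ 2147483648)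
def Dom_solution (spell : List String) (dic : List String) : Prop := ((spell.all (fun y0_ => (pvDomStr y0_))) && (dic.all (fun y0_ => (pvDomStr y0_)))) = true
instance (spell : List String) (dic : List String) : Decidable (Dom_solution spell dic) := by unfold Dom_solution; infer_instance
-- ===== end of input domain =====

-- B replaces A's per-word sort-and-compare by one character-frequency dict for spell compared
-- with each word's frequency dict (idiomatic anagram check). Python A and B both sort `spell`
-- in place; the equivalence proved here is about the return value only.

-- ===== PORT A =====
-- list(i) in Python: the characters of the string as one-character strings
def pvChars (i : String) : List String := i.toList.map (fun c => String.ofList [c])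

def solution (spell : List String) (dic : List String) : Int :=
  let sp := PySem.List.sorted spell (fun x => x) false
  dic.foldl (fun answer i =>
    if PySem.List.len sp = PySem.Str.len i then
      let result := PySem.List.sorted (pvChars i) (fun x => x) false
      if sp = result then 1 else answer
    else answer) 2

-- ===== PORT B =====
-- _freq: d[ch] = d.get(ch, 0) + 1 over the characters (one-character strings)
def pvFreq (l : List String) : PySem.Dict String Int :=
  l.foldl (fun d ch => d.insert ch (d.getD ch 0 + 1)) PySem.Dict.empty

-- Python's `d1 == d2` on dicts: same number of keys and every item of d1 found in d2
def pvDictEq (d1 d2 : PySem.Dict String Int) : Bool :=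
  PySem.Dict.size d1 == PySem.Dict.size d2 &&
    d1.items.all (fun p => PySem.Dict.getD d2 p.1 0 == p.2)

def solution_alt (spell : List String) (dic : List String) : Int :=
  let sp := PySem.List.sorted spell (fun x => x) false
  let cs := pvFreq sp
  if dic.any (fun w => pvDictEq (pvFreq (pvChars w)) cs) then 1 else 2

-- ===== PRECONDITION & SPEC =====
def Spec_solution (spell : List String) (dic : List String) (out : Int) : Prop := out = solution_alt spell dic
instance (spell : List String) (dic : List String) (out : Int) : Decidable (Spec_solution spell dic out) := by unfold Spec_solution; infer_instance

-- ===== CLAIM (what is proved, stated in full; the proofs are below) =====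
def Claim_equal_solution : Prop := ∀ (spell : List String) (dic : List String), Dom_solution spell dic → Spec_solution spell dic (solution spell dic)

-- ===== LEMMAS AND PROOFS =====

-- A's sticky loop: answer becomes 1 as soon as some word passes both tests, and stays 1.
theorem foldl_sticky {α : Type} (P Q : α → Prop) [DecidablePred P] [DecidablePred Q]
    (l : List α) (acc : Int) :
    l.foldl (fun a i => if P i then (if Q i then 1 else a) else a) acc
      = if l.any (fun i => decide (P i ∧ Q i)) then 1 else acc := by
  induction l generalizing acc with
  | nil => simp
  | cons x t ih =>
    simp only [List.foldl_cons, List.any_cons, ih]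
    by_cases hP : P x <;> by_cases hQ : Q x <;> simp [hP, hQ]

-- B's frequency dict IS Counter
theorem pvFreq_eq_counter (l : List String) : pvFreq l = PySem.Dict.counter l := by
  simpa [pvFreq] using PySem.Dict.foldl_insert_getD_add_one_eq_counter (xs := l)

-- B's dict comparison decides permutation of the underlying lists
theorem pvDictEq_counter_iff (ys xs : List String) :
    pvDictEq (PySem.Dict.counter ys) (PySem.Dict.counter xs) = true ↔ ys.Perm xs := by
  constructor
  · intro h
    simp only [pvDictEq, Bool.and_eq_true, List.all_eq_true, beq_iff_eq,
      PySem.Dict.size, PySem.Dict.items_counter, List.length_map] at h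
    obtain ⟨hlen, hitems⟩ := h
    have hcnt : ∀ k ∈ PySem.Set.ofList ys, xs.count k = ys.count k := by
      intro k hk
      have h2 : (xs.count k : Int) = (ys.count k : Int) := by
        simpa [PySem.Dict.getD_counter] using
          hitems (k, (ys.count k : Int)) (List.mem_map_of_mem hk)
      exact_mod_cast h2
    have hsub : PySem.Set.ofList ys ⊆ PySem.Set.ofList xs := by
      intro k hk
      have hky : k ∈ ys := (PySem.Set.mem_ofList _ _).1 hk
      have hx : 0 < xs.count k := by
        have h1 : 0 < ys.count k := List.count_pos_iff.2 hky
        have := hcnt k hk; omega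
      exact (PySem.Set.mem_ofList _ _).2 (List.count_pos_iff.1 hx)
    have hperm : (PySem.Set.ofList ys).Perm (PySem.Set.ofList xs) :=
      List.Subperm.perm_of_length_le
        (List.subperm_of_subset (PySem.Set.nodup_ofList ys) hsub) (by omega)
    rw [List.perm_iff_count]
    intro a
    by_cases ha : a ∈ ys
    · exact (hcnt a ((PySem.Set.mem_ofList _ _).2 ha)).symm
    · have hax : a ∉ xs := by
        intro hax
        exact ha ((PySem.Set.mem_ofList _ _).1 (hperm.mem_iff.2 ((PySem.Set.mem_ofList _ _).2 hax)))
      simp [List.count_eq_zero_of_not_mem, ha, hax]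
  · intro hp
    simp only [pvDictEq, Bool.and_eq_true, List.all_eq_true, beq_iff_eq,
      PySem.Dict.size, PySem.Dict.items_counter, List.length_map]
    have hperm : (PySem.Set.ofList ys).Perm (PySem.Set.ofList xs) := by
      rw [List.perm_ext_iff_of_nodup (PySem.Set.nodup_ofList ys) (PySem.Set.nodup_ofList xs)]
      intro a
      simp only [PySem.Set.mem_ofList]
      exact hp.mem_iff
    refine ⟨hperm.length_eq, ?_⟩
    intro p hpmem
    obtain ⟨k, hk, rfl⟩ := List.mem_map.1 hpmem
    simp [PySem.Dict.getD_counter, hp.count_eq]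

-- the per-word tests of A and B agree
theorem tests_agree (spell : List String) (i : String) :
    ((PySem.List.len (PySem.List.sorted spell (fun x => x) false) = PySem.Str.len i) ∧
      PySem.List.sorted spell (fun x => x) false = PySem.List.sorted (pvChars i) (fun x => x) false)
      ↔ pvDictEq (pvFreq (pvChars i)) (pvFreq (PySem.List.sorted spell (fun x => x) false)) = true := by
  rw [pvFreq_eq_counter, pvFreq_eq_counter, pvDictEq_counter_iff]
  constructor
  · rintro ⟨-, h⟩
    have h1 : (PySem.List.sorted spell (fun x => x) false).Perm (pvChars i) := by
      rw [h]; exact PySem.List.sorted_perm (pvChars i) (fun x => x) false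
    exact h1.symm
  · intro hp
    have hspell : spell.Perm (pvChars i) :=
      (PySem.List.sorted_perm spell (fun x => x) false).symm.trans hp.symm
    constructor
    · have h1 : (PySem.List.sorted spell (fun x => x) false).length = (pvChars i).length :=
        ((PySem.List.sorted_perm spell (fun x => x) false).trans hspell).length_eq
      have h2 : (pvChars i).length = i.toList.length := by simp [pvChars]
      rw [PySem.List.len_eq, PySem.Str.len_eq, h1, h2]
    · exact (PySem.List.sorted_eq_sorted_of_perm spell (pvChars i) (fun x => x)
        (fun a b hab => hab) hspell)

-- ===== VERDICT (by name: the statement is the Claim_ definition above) =====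
theorem solution_spec : Claim_equal_solution := by
  intro spell dic _
  unfold Spec_solution solution solution_alt
  rw [foldl_sticky
    (fun i => PySem.List.len (PySem.List.sorted spell (fun x => x) false) = PySem.Str.len i)
    (fun i => PySem.List.sorted spell (fun x => x) false
              = PySem.List.sorted (pvChars i) (fun x => x) false)]
  have hany : (dic.any fun i =>
      decide ((PySem.List.len (PySem.List.sorted spell (fun x => x) false) = PySem.Str.len i) ∧
        PySem.List.sorted spell (fun x => x) false
          = PySem.List.sorted (pvChars i) (fun x => x) false))
      = dic.any (fun w => pvDictEq (pvFreq (pvChars w))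
          (pvFreq (PySem.List.sorted spell (fun x => x) false))) := by
    refine List.any_congr rfl (fun i => ?_)
    by_cases hp : (PySem.List.len (PySem.List.sorted spell (fun x => x) false) = PySem.Str.len i) ∧
        PySem.List.sorted spell (fun x => x) false
          = PySem.List.sorted (pvChars i) (fun x => x) false
    · rw [decide_eq_true hp, (tests_agree spell i).1 hp]
    · rw [decide_eq_false hp]
      cases hb : pvDictEq (pvFreq (pvChars i))
          (pvFreq (PySem.List.sorted spell (fun x => x) false)) with
      | false => rfl
      | true => exact absurd ((tests_agree spell i).2 hb) hp
  rw [hany]
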